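-- pv_equiv track=rewrite | github.com/JustDoYoung/Coding-Test | 프로그래머스/1/258712. 가장 많이 받은 선물/가장 많이 받은 선물.py | solution
-- ===== SOURCE A (Python) =====
-- def solution(friends, gifts):
--     answer = 0
--     friends_length = len(friends)
--
--     give_and_take_matrix = [[0] * friends_length for _ in range(friends_length)]
--     gift_index = [0] * friends_length
--     gift_count = [0] * friends_length
--
--     friends_dict = {name: index for index, name in enumerate(friends)}
--
--     for give_and_take_history in gifts:
--         split_give_and_take = give_and_take_history.split(" ")
--         givePerson = friends_dict[split_give_and_take[0]]
--         takePerson = friends_dict[split_give_and_take[1]]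
--
--         # 선물지수
--         gift_index[givePerson] += 1
--         gift_index[takePerson] -= 1
--
--         # 두 사람 간 선물 내역
--         give_and_take_matrix[givePerson][takePerson] += 1
--
--     for i in range(0, friends_length):
--         for j in range(0, friends_length):
--             if i == j:
--                 continue
--
--             if give_and_take_matrix[i][j] > give_and_take_matrix[j][i] or (
--                 give_and_take_matrix[i][j] == give_and_take_matrix[j][i]
--                 and gift_index[i] > gift_index[j]
--             ):
--                 gift_count[i] += 1
--
--     answer = max(gift_count)
--
--     return answer
-- ===== SOURCE B (Python) =====
-- def solution(friends, gifts):
--     pos = {name: i for i, name in enumerate(friends)}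
--     n = len(friends)
--     net = {}
--     bal = [0] * n
--     for line in gifts:
--         toks = line.split(" ")
--         a = pos[toks[0]]
--         b = pos[toks[1]]
--         key = (a, b) if a <= b else (b, a)
--         net[key] = net.get(key, 0) + (1 if a <= b else -1)
--         bal[a] += 1
--         bal[b] -= 1
--     # rank step: wins[i] starts as the number of friends with strictly smaller balance
--     freq = {}
--     for v in bal:
--         freq[v] = freq.get(v, 0) + 1
--     less = {}
--     run = 0
--     for v in sorted(freq):
--         less[v] = run
--         run += freq[v]
--     wins = [less[v] for v in bal]
--     # decisive pairs only: credit the winner and revoke the rank credit (not a tie)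
--     for (x, y), d in net.items():
--         if x == y or d == 0:
--             continue
--         if d > 0:
--             wins[x] += 1
--         else:
--             wins[y] += 1
--         if bal[y] < bal[x]:
--             wins[x] -= 1
--         if bal[x] < bal[y]:
--             wins[y] -= 1
--     return max(wins)
-- ===== Notes on version B (the rewrite author's own statement) =====
-- stated objective: alternative
-- what changed: B drops A's ordered n-by-n double loop over a full give/take matrix: one parse pass builds a signed per-pair net counter and the balance list, each friend's tie wins are obtained at once as his rank among the sorted balances (prefix sums of a balance histogram), and only the pairs that actually exchanged gifts are visited to credit the decisive winner and revoke the tie credit.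
import Mathlib
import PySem

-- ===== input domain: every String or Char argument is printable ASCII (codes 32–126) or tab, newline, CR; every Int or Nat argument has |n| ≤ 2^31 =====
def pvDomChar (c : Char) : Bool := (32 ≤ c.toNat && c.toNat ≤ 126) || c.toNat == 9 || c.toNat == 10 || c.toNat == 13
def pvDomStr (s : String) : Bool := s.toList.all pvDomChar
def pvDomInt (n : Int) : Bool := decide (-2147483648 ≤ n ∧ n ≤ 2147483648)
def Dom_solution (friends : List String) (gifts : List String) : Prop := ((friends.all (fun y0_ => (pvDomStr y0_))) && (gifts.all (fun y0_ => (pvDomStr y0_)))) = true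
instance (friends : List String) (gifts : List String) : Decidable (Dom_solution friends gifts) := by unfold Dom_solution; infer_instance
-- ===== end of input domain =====

-- B replaces A's ordered double loop over a full give/take matrix by a rank computation: each
-- friend starts with the number of friends of strictly smaller gift balance (all pairs counted
-- as ties), and only the pairs that actually exchanged gifts (a signed per-pair net counter)
-- are visited to credit the decisive winner and revoke the tie credit.

-- ===== PORT A =====
-- friends_dict = {name: index for index, name in enumerate(friends)}
def buildDict (friends : List String) : PySem.Dict String Int :=
  (PySem.List.enumerate friends 0).foldl (fun d p => d.insert p.2 p.1) PySem.Dict.empty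

def solution (friends : List String) (gifts : List String) : Int :=
  let n : Int := (friends.length : Int)
  let matrix0 : List (List Int) :=
    (PySem.List.pyRange 0 n 1).map (fun _ => PySem.List.pyRepeat [(0 : Int)] n)
  let giftIndex0 : List Int := PySem.List.pyRepeat [(0 : Int)] n
  let giftCount0 : List Int := PySem.List.pyRepeat [(0 : Int)] n
  let fd := buildDict friends
  -- for give_and_take_history in gifts: …  (KeyError/IndexError excluded by Pre_; getD stands in)
  let st := gifts.foldl (fun (st : List (List Int) × List Int) g =>
      let toks := (PySem.Str.split? g " ").getD []
      let givePerson := fd.getD (PySem.List.pyGetD toks 0 "") 0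
      let takePerson := fd.getD (PySem.List.pyGetD toks 1 "") 0
      let gi1 := PySem.List.pySetD st.2 givePerson (PySem.List.pyGetD st.2 givePerson 0 + 1)
      let gi2 := PySem.List.pySetD gi1 takePerson (PySem.List.pyGetD gi1 takePerson 0 - 1)
      let row := PySem.List.pyGetD st.1 givePerson []
      let m1 := PySem.List.pySetD st.1 givePerson
        (PySem.List.pySetD row takePerson (PySem.List.pyGetD row takePerson 0 + 1))
      (m1, gi2)) (matrix0, giftIndex0)
  let matrix := st.1
  let giftIndex := st.2
  -- for i in range(0, n): for j in range(0, n): …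
  let giftCount := (PySem.List.pyRange 0 n 1).foldl (fun gc i =>
      (PySem.List.pyRange 0 n 1).foldl (fun gc j =>
        if i = j then gc
        else if PySem.List.pyGetD (PySem.List.pyGetD matrix i []) j 0 >
                  PySem.List.pyGetD (PySem.List.pyGetD matrix j []) i 0 ∨
                (PySem.List.pyGetD (PySem.List.pyGetD matrix i []) j 0 =
                  PySem.List.pyGetD (PySem.List.pyGetD matrix j []) i 0 ∧
                 PySem.List.pyGetD giftIndex i 0 > PySem.List.pyGetD giftIndex j 0)
        then PySem.List.pySetD gc i (PySem.List.pyGetD gc i 0 + 1)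
        else gc) gc) giftCount0
  -- answer = max(gift_count)   (friends ≠ [] by Pre_)
  (PySem.List.max? giftCount (fun x => x)).getD 0

-- ===== PORT B =====
-- pos = {name: i for i, name in enumerate(friends)}
def buildIdx (friends : List String) : PySem.Dict String Int :=
  (PySem.List.enumerate friends 0).foldl (fun d p => d.insert p.2 p.1) PySem.Dict.empty

def solution_alt (friends : List String) (gifts : List String) : Int :=
  let pos := buildIdx friends
  let n : Int := (friends.length : Int)
  -- one parsing pass: a SIGNED net counter per unordered pair, plus the balance list
  let st := gifts.foldl (fun (st : PySem.Dict (Int × Int) Int × List Int) line =>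
      let toks := (PySem.Str.split? line " ").getD []
      let a := pos.getD (PySem.List.pyGetD toks 0 "") 0
      let b := pos.getD (PySem.List.pyGetD toks 1 "") 0
      let key := if a ≤ b then (a, b) else (b, a)
      let net := st.1.insert key (st.1.getD key 0 + (if a ≤ b then (1 : Int) else -1))
      let bal1 := PySem.List.pySetD st.2 a (PySem.List.pyGetD st.2 a 0 + 1)
      let bal2 := PySem.List.pySetD bal1 b (PySem.List.pyGetD bal1 b 0 - 1)
      (net, bal2)) (PySem.Dict.empty, PySem.List.pyRepeat [(0 : Int)] n)
  let net := st.1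
  let bal := st.2
  -- rank step: wins[i] starts as the number of friends with strictly smaller balance
  let freq := bal.foldl (fun d v => d.insert v (d.getD v 0 + 1)) PySem.Dict.empty
  let lr := (PySem.List.sorted freq.keys (fun x => x) false).foldl
      (fun (lr : PySem.Dict Int Int × Int) v => (lr.1.insert v lr.2, lr.2 + freq.getD v 0))
      (PySem.Dict.empty, 0)
  let less := lr.1
  let wins0 := bal.map (fun v => less.getD v 0)
  -- decisive pairs only: credit the winner and revoke the rank credit (not a tie)
  let wins := net.items.foldl (fun w p =>
      if p.1.1 = p.1.2 ∨ p.2 = 0 then w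
      else
        let w1 := if 0 < p.2 then PySem.List.pySetD w p.1.1 (PySem.List.pyGetD w p.1.1 0 + 1)
                  else PySem.List.pySetD w p.1.2 (PySem.List.pyGetD w p.1.2 0 + 1)
        let w2 := if PySem.List.pyGetD bal p.1.2 0 < PySem.List.pyGetD bal p.1.1 0
                  then PySem.List.pySetD w1 p.1.1 (PySem.List.pyGetD w1 p.1.1 0 - 1) else w1
        if PySem.List.pyGetD bal p.1.1 0 < PySem.List.pyGetD bal p.1.2 0
        then PySem.List.pySetD w2 p.1.2 (PySem.List.pyGetD w2 p.1.2 0 - 1) else w2) wins0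
  (PySem.List.max? wins (fun x => x)).getD 0

-- ===== PRECONDITION & SPEC =====
-- Pre_ excludes exactly the inputs where A raises: empty friends (max([]) is a ValueError),
-- a gift with fewer than two space-separated tokens (IndexError), or a token that is not a
-- friend's name (KeyError).
def Pre_solution (friends : List String) (gifts : List String) : Prop :=
  friends ≠ [] ∧ ∀ g ∈ gifts,
    2 ≤ ((PySem.Str.split? g " ").getD []).length ∧
    ((PySem.Str.split? g " ").getD []).getD 0 "" ∈ friends ∧
    ((PySem.Str.split? g " ").getD []).getD 1 "" ∈ friends
instance (friends : List String) (gifts : List String) : Decidable (Pre_solution friends gifts) := by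
  unfold Pre_solution; infer_instance

def pvWitness_solution : List String × List String :=
  (["muzi", "frodo"], ["muzi frodo", "frodo muzi", "muzi frodo"])

def Spec_solution (friends : List String) (gifts : List String) (out : Int) : Prop := out = solution_alt friends gifts
instance (friends : List String) (gifts : List String) (out : Int) : Decidable (Spec_solution friends gifts out) := by unfold Spec_solution; infer_instance

-- ===== CLAIM (what is proved, stated in full; the proofs are below) =====
def Claim_equal_solution : Prop := ∀ (friends : List String) (gifts : List String), Dom_solution friends gifts → Pre_solution friends gifts → Spec_solution friends gifts (solution friends gifts)

-- ===== LEMMAS AND PROOFS =====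

-- the (giver, taker) index pair a gift line denotes
def gAddr (friends : List String) (g : String) : Int × Int :=
  ((buildDict friends).getD (PySem.List.pyGetD ((PySem.Str.split? g " ").getD []) 0 "") 0,
   (buildDict friends).getD (PySem.List.pyGetD ((PySem.Str.split? g " ").getD []) 1 "") 0)

def addrs (friends gifts : List String) : List (Int × Int) := gifts.map (gAddr friends)

def mStep (friends : List String) (m : List (List Int)) (g : String) : List (List Int) :=
  PySem.List.pySetD m (gAddr friends g).1
    (PySem.List.pySetD (PySem.List.pyGetD m (gAddr friends g).1 []) (gAddr friends g).2
      (PySem.List.pyGetD (PySem.List.pyGetD m (gAddr friends g).1 []) (gAddr friends g).2 0 + 1))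

def giStep (friends : List String) (gi : List Int) (g : String) : List Int :=
  PySem.List.pySetD
    (PySem.List.pySetD gi (gAddr friends g).1 (PySem.List.pyGetD gi (gAddr friends g).1 0 + 1))
    (gAddr friends g).2
    (PySem.List.pyGetD
      (PySem.List.pySetD gi (gAddr friends g).1 (PySem.List.pyGetD gi (gAddr friends g).1 0 + 1))
      (gAddr friends g).2 0 - 1)

def zerosL (friends : List String) : List Int :=
  PySem.List.pyRepeat [(0 : Int)] (friends.length : Int)

def matrixZero (friends : List String) : List (List Int) :=
  (PySem.List.pyRange 0 (friends.length : Int) 1).map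
    (fun _ => PySem.List.pyRepeat [(0 : Int)] (friends.length : Int))

def matFinal (friends gifts : List String) : List (List Int) :=
  gifts.foldl (mStep friends) (matrixZero friends)

def giFinal (friends gifts : List String) : List Int :=
  gifts.foldl (giStep friends) (zerosL friends)

-- A's second phase, as a function of the parsed data
def gcA (friends : List String) (matrix : List (List Int)) (giftIndex : List Int) : List Int :=
  (PySem.List.pyRange 0 (friends.length : Int) 1).foldl (fun gc i =>
    (PySem.List.pyRange 0 (friends.length : Int) 1).foldl (fun gc j =>
      if i = j then gc
      else if PySem.List.pyGetD (PySem.List.pyGetD matrix i []) j 0 >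
                PySem.List.pyGetD (PySem.List.pyGetD matrix j []) i 0 ∨
              (PySem.List.pyGetD (PySem.List.pyGetD matrix i []) j 0 =
                PySem.List.pyGetD (PySem.List.pyGetD matrix j []) i 0 ∧
               PySem.List.pyGetD giftIndex i 0 > PySem.List.pyGetD giftIndex j 0)
      then PySem.List.pySetD gc i (PySem.List.pyGetD gc i 0 + 1)
      else gc) gc) (zerosL friends)

-- B-side parsed data: canonical key, sign, net counter, rank dictionaries, correction fold
def canonK (p : Int × Int) : Int × Int := if p.1 ≤ p.2 then p else (p.2, p.1)

def sgnK (p : Int × Int) : Int := if p.1 ≤ p.2 then 1 else -1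

def netStep (friends : List String) (d : PySem.Dict (Int × Int) Int) (g : String) :
    PySem.Dict (Int × Int) Int :=
  d.insert (canonK (gAddr friends g))
    (d.getD (canonK (gAddr friends g)) 0 + sgnK (gAddr friends g))

def netFinal (friends gifts : List String) : PySem.Dict (Int × Int) Int :=
  gifts.foldl (netStep friends) PySem.Dict.empty

def freqD (bal : List Int) : PySem.Dict Int Int :=
  bal.foldl (fun d v => d.insert v (d.getD v 0 + 1)) PySem.Dict.empty

def lessD (bal : List Int) : PySem.Dict Int Int :=
  ((PySem.List.sorted (freqD bal).keys (fun x => x) false).foldl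
    (fun (lr : PySem.Dict Int Int × Int) v => (lr.1.insert v lr.2, lr.2 + (freqD bal).getD v 0))
    (PySem.Dict.empty, 0)).1

def wins0L (bal : List Int) : List Int := bal.map (fun v => (lessD bal).getD v 0)

def winsStep (bal : List Int) (w : List Int) (p : (Int × Int) × Int) : List Int :=
  if p.1.1 = p.1.2 ∨ p.2 = 0 then w
  else
    let w1 := if 0 < p.2 then PySem.List.pySetD w p.1.1 (PySem.List.pyGetD w p.1.1 0 + 1)
              else PySem.List.pySetD w p.1.2 (PySem.List.pyGetD w p.1.2 0 + 1)
    let w2 := if PySem.List.pyGetD bal p.1.2 0 < PySem.List.pyGetD bal p.1.1 0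
              then PySem.List.pySetD w1 p.1.1 (PySem.List.pyGetD w1 p.1.1 0 - 1) else w1
    if PySem.List.pyGetD bal p.1.1 0 < PySem.List.pyGetD bal p.1.2 0
    then PySem.List.pySetD w2 p.1.2 (PySem.List.pyGetD w2 p.1.2 0 - 1) else w2

def winsB (friends gifts : List String) : List Int :=
  (netFinal friends gifts).items.foldl (winsStep (giFinal friends gifts))
    (wins0L (giFinal friends gifts))

-- staging: each port is its parse fold (split into components) followed by its second phase
lemma solutionA_staged (friends gifts : List String) :
    solution friends gifts =
      (PySem.List.max? (gcA friends (matFinal friends gifts) (giFinal friends gifts))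
        (fun x => x)).getD 0 := by
  have h := PySem.List.foldl_prod_mk (mStep friends) (giStep friends) gifts
    (matrixZero friends) (zerosL friends)
  calc solution friends gifts
      = (PySem.List.max?
          (gcA friends
            (List.foldl (fun st g => (mStep friends st.1 g, giStep friends st.2 g))
              (matrixZero friends, zerosL friends) gifts).1
            (List.foldl (fun st g => (mStep friends st.1 g, giStep friends st.2 g))
              (matrixZero friends, zerosL friends) gifts).2)
          (fun x => x)).getD 0 := by rfl
    _ = _ := by rw [h]; rfl

lemma solutionB_staged (friends gifts : List String) :
    solution_alt friends gifts =
      (PySem.List.max? (winsB friends gifts) (fun x => x)).getD 0 := by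
  have h := PySem.List.foldl_prod_mk (netStep friends) (giStep friends) gifts
    PySem.Dict.empty (zerosL friends)
  calc solution_alt friends gifts
      = (PySem.List.max?
          ((List.foldl (fun st g => (netStep friends st.1 g, giStep friends st.2 g))
              (PySem.Dict.empty, zerosL friends) gifts).1.items.foldl
            (winsStep (List.foldl (fun st g => (netStep friends st.1 g, giStep friends st.2 g))
              (PySem.Dict.empty, zerosL friends) gifts).2)
            (wins0L (List.foldl (fun st g => (netStep friends st.1 g, giStep friends st.2 g))
              (PySem.Dict.empty, zerosL friends) gifts).2))
          (fun x => x)).getD 0 := by rfl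
    _ = _ := by rw [h]; rfl

-- dict values produced by {name: index for index, name in enumerate(friends)} are < len(friends)
lemma get?_foldl_insert_P (P : Int → Prop) :
    ∀ (L : List (Int × String)) (d : PySem.Dict String Int),
      (∀ k v, d.get? k = some v → P v) → (∀ p ∈ L, P p.1) →
      ∀ k v, (L.foldl (fun d p => d.insert p.2 p.1) d).get? k = some v → P v := by
  intro L
  induction L with
  | nil => intro d hd _ k v h; exact hd k v h
  | cons p t ih =>
    intro d hd hL k v h
    refine ih (d.insert p.2 p.1) ?_ (fun q hq => hL q (List.mem_cons_of_mem _ hq)) k v h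
    intro k' v' h'
    rw [PySem.Dict.get?_insert] at h'
    by_cases hk : k' = p.2
    · rw [if_pos hk] at h'
      cases h'
      exact hL p List.mem_cons_self
    · rw [if_neg hk] at h'
      exact hd k' v' h'

lemma buildDict_getD_bounds (friends : List String) (h : friends ≠ []) (name : String) :
    0 ≤ (buildDict friends).getD name 0 ∧
      (buildDict friends).getD name 0 < (friends.length : Int) := by
  have hn : 0 < (friends.length : Int) := by
    have : friends.length ≠ 0 := fun hc => h (List.length_eq_zero_iff.mp hc)
    omega
  rw [PySem.Dict.getD_eq_get?_getD]
  cases hg : (buildDict friends).get? name with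
  | none => simp; omega
  | some v =>
    have := get?_foldl_insert_P (fun v => 0 ≤ v ∧ v < (friends.length : Int))
      (PySem.List.enumerate friends 0) PySem.Dict.empty
      (by intro k v h; simp [PySem.Dict.get?_empty] at h)
      (by
        intro p hp
        rw [PySem.List.mem_enumerate_iff] at hp
        obtain ⟨k, hk, rfl⟩ := hp
        constructor
        · omega
        · simp
          omega)
      name v hg
    simpa using this

lemma gAddr_bounds (friends : List String) (h : friends ≠ []) (g : String) :
    0 ≤ (gAddr friends g).1 ∧ (gAddr friends g).1 < (friends.length : Int) ∧
    0 ≤ (gAddr friends g).2 ∧ (gAddr friends g).2 < (friends.length : Int) := by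
  have h1 := buildDict_getD_bounds friends h
    (PySem.List.pyGetD ((PySem.Str.split? g " ").getD []) 0 "")
  have h2 := buildDict_getD_bounds friends h
    (PySem.List.pyGetD ((PySem.Str.split? g " ").getD []) 1 "")
  exact ⟨h1.1, h1.2, h2.1, h2.2⟩

-- indexing through pySetD, Int indices
lemma pyGetD_pySetD_int {α : Type} (xs : List α) (a i : Int) (v d : α)
    (h0 : 0 ≤ a) (h1 : a < (xs.length : Int)) (h2 : 0 ≤ i) (_h3 : i < (xs.length : Int)) :
    PySem.List.pyGetD (PySem.List.pySetD xs a v) i d =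
      if i = a then v else PySem.List.pyGetD xs i d := by
  lift a to ℕ using h0 with na
  lift i to ℕ using h2 with ni
  rw [PySem.List.pyGetD_pySetD_natCast xs na ni v d (by exact_mod_cast h1)]
  by_cases hh : ni = na
  · simp [hh]
  · have : ¬ ((ni : Int) = (na : Int)) := by exact_mod_cast hh
    simp [hh, this]

-- matrix fold: each (give, take) event adds one to its cell
def mUpd (m : List (List Int)) (p : Int × Int) : List (List Int) :=
  PySem.List.pySetD m p.1
    (PySem.List.pySetD (PySem.List.pyGetD m p.1 []) p.2
      (PySem.List.pyGetD (PySem.List.pyGetD m p.1 []) p.2 0 + 1))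

lemma matrix_count (nn : Int) :
    ∀ (L : List (Int × Int)),
      (∀ p ∈ L, 0 ≤ p.1 ∧ p.1 < nn ∧ 0 ≤ p.2 ∧ p.2 < nn) →
      ∀ m : List (List Int), (m.length : Int) = nn → (∀ r ∈ m, (r.length : Int) = nn) →
      ∀ i j : Int, 0 ≤ i → i < nn → 0 ≤ j → j < nn →
        PySem.List.pyGetD (PySem.List.pyGetD (L.foldl mUpd m) i []) j 0 =
          PySem.List.pyGetD (PySem.List.pyGetD m i []) j 0 + (L.count (i, j) : Int) := by
  intro L
  induction L with
  | nil => intro _ m _ _ i j _ _ _ _; simp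
  | cons p t ih =>
    intro hL m hlen hrow i j hi0 hi1 hj0 hj1
    obtain ⟨hp1, hp2, hp3, hp4⟩ := hL p List.mem_cons_self
    have hrowmem : PySem.List.pyGetD m p.1 [] ∈ m :=
      PySem.List.pyGetD_mem m [] (by unfold PySem.Raise.InRange; omega)
    have hrlen : ((PySem.List.pyGetD m p.1 []).length : Int) = nn := hrow _ hrowmem
    have hlen' : ((mUpd m p).length : Int) = nn := by
      unfold mUpd; rw [PySem.List.length_pySetD]; exact hlen
    have hrow' : ∀ r ∈ mUpd m p, (r.length : Int) = nn := by
      intro r hr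
      unfold mUpd at hr
      rw [PySem.List.pySetD_of_nonneg _ _ hp1] at hr
      rcases List.mem_or_eq_of_mem_set hr with h | h
      · exact hrow r h
      · subst h; rw [PySem.List.length_pySetD]; exact hrlen
    have hstep := ih (fun q hq => hL q (List.mem_cons_of_mem _ hq)) (mUpd m p) hlen' hrow'
      i j hi0 hi1 hj0 hj1
    rw [List.foldl_cons, hstep]
    have hentry : PySem.List.pyGetD (PySem.List.pyGetD (mUpd m p) i []) j 0 =
        PySem.List.pyGetD (PySem.List.pyGetD m i []) j 0 +
          (if (i, j) = p then 1 else 0) := by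
      unfold mUpd
      rw [pyGetD_pySetD_int m p.1 i _ [] hp1 (by omega) hi0 (by omega)]
      by_cases hip : i = p.1
      · subst hip
        rw [if_pos rfl]
        rw [pyGetD_pySetD_int (PySem.List.pyGetD m p.1 []) p.2 j _ 0 hp3 (by omega) hj0
          (by omega)]
        by_cases hjp : j = p.2
        · subst hjp; simp
        · simp [hjp, Prod.ext_iff]
      · rw [if_neg hip]
        simp [hip, Prod.ext_iff]
    rw [hentry, List.count_cons]
    have : (p == (i, j)) = decide ((i, j) = p) := by
      by_cases h : p = (i, j)
      · subst h; simp
      · simp [h, Ne.symm h]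
    rw [this]
    by_cases h : (i, j) = p
    · simp [h]
      omega
    · simp [h]

-- matrix characterisation
lemma matFinal_entry (friends gifts : List String) (hne : friends ≠ [])
    (i j : Int) (hi0 : 0 ≤ i) (hi1 : i < (friends.length : Int))
    (hj0 : 0 ≤ j) (hj1 : j < (friends.length : Int)) :
    PySem.List.pyGetD (PySem.List.pyGetD (matFinal friends gifts) i []) j 0 =
      ((addrs friends gifts).count (i, j) : Int) := by
  have hfold : matFinal friends gifts = (addrs friends gifts).foldl mUpd (matrixZero friends) := by
    unfold matFinal addrs
    rw [List.foldl_map]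
    rfl
  have hlen : ((matrixZero friends).length : Int) = (friends.length : Int) := by
    unfold matrixZero
    rw [List.length_map, PySem.List.length_pyRange_one]
    omega
  have hrow : ∀ r ∈ matrixZero friends, (r.length : Int) = (friends.length : Int) := by
    intro r hr
    unfold matrixZero at hr
    rcases List.mem_map.mp hr with ⟨_, _, rfl⟩
    rw [PySem.List.pyRepeat_singleton, List.length_replicate]
    omega
  have hz : PySem.List.pyGetD (PySem.List.pyGetD (matrixZero friends) i []) j 0 = 0 := by
    have hm : PySem.List.pyGetD (matrixZero friends) i [] ∈ matrixZero friends :=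
      PySem.List.pyGetD_mem _ [] (by unfold PySem.Raise.InRange; omega)
    have hv : PySem.List.pyGetD (matrixZero friends) i [] =
        PySem.List.pyRepeat [(0 : Int)] (friends.length : Int) := by
      unfold matrixZero at hm
      rcases List.mem_map.mp hm with ⟨_, _, hrr⟩
      exact hrr.symm
    rw [hv, PySem.List.pyRepeat_singleton]
    rw [PySem.List.pyGetD_eq_getElem _ _ hj0 (by simp; omega)]
    simp
  rw [hfold, matrix_count (friends.length : Int) (addrs friends gifts) ?_ (matrixZero friends)
    hlen hrow i j hi0 hi1 hj0 hj1, hz, zero_add]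
  intro p hp
  unfold addrs at hp
  rcases List.mem_map.mp hp with ⟨g, _, rfl⟩
  exact gAddr_bounds friends hne g

-- generic increment fold for A's counting phase
def incStep (tgt : Int × Int → Option Int) (gc : List Int) (e : Int × Int) : List Int :=
  match tgt e with
  | some t => PySem.List.pySetD gc t (PySem.List.pyGetD gc t 0 + 1)
  | none => gc

lemma length_foldl_incStep (tgt : Int × Int → Option Int) :
    ∀ (L : List (Int × Int)) (gc : List Int), (L.foldl (incStep tgt) gc).length = gc.length := by
  intro L
  induction L with
  | nil => intro gc; rfl
  | cons e t ih =>
    intro gc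
    rw [List.foldl_cons, ih]
    cases htg : tgt e <;> simp [incStep, htg, PySem.List.length_pySetD]

lemma foldl_incStep_entry (tgt : Int × Int → Option Int) :
    ∀ (L : List (Int × Int)) (gc : List Int),
      (∀ e ∈ L, ∀ t, tgt e = some t → 0 ≤ t ∧ t < (gc.length : Int)) →
      ∀ k : Int, 0 ≤ k → k < (gc.length : Int) →
        PySem.List.pyGetD (L.foldl (incStep tgt) gc) k 0 =
          PySem.List.pyGetD gc k 0 + (L.countP (fun e => tgt e == some k) : Int) := by
  intro L
  induction L with
  | nil => intro gc _ k _ _; simp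
  | cons e t ih =>
    intro gc hb k hk0 hk1
    rw [List.foldl_cons, List.countP_cons]
    cases htg : tgt e with
    | none =>
      have hs : incStep tgt gc e = gc := by simp [incStep, htg]
      rw [hs, ih gc (fun q hq => hb q (List.mem_cons_of_mem _ hq)) k hk0 hk1]
      simp
    | some tt =>
      have hbt := hb e List.mem_cons_self tt htg
      have hs : incStep tgt gc e =
          PySem.List.pySetD gc tt (PySem.List.pyGetD gc tt 0 + 1) := by simp [incStep, htg]
      have hlen : ((PySem.List.pySetD gc tt (PySem.List.pyGetD gc tt 0 + 1)).length : Int) =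
          (gc.length : Int) := by rw [PySem.List.length_pySetD]
      rw [hs, ih _ (fun q hq t ht => by
            rw [hlen]; exact hb q (List.mem_cons_of_mem _ hq) t ht) k hk0 (by omega)]
      rw [pyGetD_pySetD_int gc tt k _ 0 hbt.1 hbt.2 hk0 hk1]
      simp only [beq_iff_eq, Option.some.injEq]
      by_cases h1 : k = tt
      · subst h1
        rw [if_pos rfl, if_pos rfl]
        push_cast
        ring
      · rw [if_neg h1, if_neg (fun h => h1 h.symm)]
        push_cast
        ring

lemma foldl_nested {σ : Type} (f : σ → Int → Int → σ) :
    ∀ (L : List Int) (F : Int → List Int) (s : σ),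
      L.foldl (fun s i => (F i).foldl (fun s j => f s i j) s) s =
        (L.flatMap (fun i => (F i).map (fun j => (i, j)))).foldl (fun s p => f s p.1 p.2) s := by
  intro L
  induction L with
  | nil => intro F s; rfl
  | cons a t ih =>
    intro F s
    rw [List.foldl_cons, List.flatMap_cons, List.foldl_append, List.foldl_map, ih]

def pairsA (friends : List String) : List (Int × Int) :=
  (PySem.List.pyRange 0 (friends.length : Int) 1).flatMap
    (fun i => (PySem.List.pyRange 0 (friends.length : Int) 1).map (fun j => (i, j)))

def tgtA (matrix : List (List Int)) (giftIndex : List Int) (p : Int × Int) : Option Int :=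
  if p.1 = p.2 then none
  else if PySem.List.pyGetD (PySem.List.pyGetD matrix p.1 []) p.2 0 >
            PySem.List.pyGetD (PySem.List.pyGetD matrix p.2 []) p.1 0 ∨
          (PySem.List.pyGetD (PySem.List.pyGetD matrix p.1 []) p.2 0 =
            PySem.List.pyGetD (PySem.List.pyGetD matrix p.2 []) p.1 0 ∧
           PySem.List.pyGetD giftIndex p.1 0 > PySem.List.pyGetD giftIndex p.2 0)
  then some p.1 else none

lemma gcA_fold (friends : List String) (matrix : List (List Int)) (giftIndex : List Int) :
    gcA friends matrix giftIndex =
      (pairsA friends).foldl (incStep (tgtA matrix giftIndex)) (zerosL friends) := by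
  have hfun : (fun (gc : List Int) (p : Int × Int) =>
      (fun gc i j =>
        if i = j then gc
        else if PySem.List.pyGetD (PySem.List.pyGetD matrix i []) j 0 >
                  PySem.List.pyGetD (PySem.List.pyGetD matrix j []) i 0 ∨
                (PySem.List.pyGetD (PySem.List.pyGetD matrix i []) j 0 =
                  PySem.List.pyGetD (PySem.List.pyGetD matrix j []) i 0 ∧
                 PySem.List.pyGetD giftIndex i 0 > PySem.List.pyGetD giftIndex j 0)
        then PySem.List.pySetD gc i (PySem.List.pyGetD gc i 0 + 1)
        else gc) gc p.1 p.2) = incStep (tgtA matrix giftIndex) := by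
    funext gc p
    simp only [incStep, tgtA]
    split_ifs <;> rfl
  refine Eq.trans (foldl_nested (fun gc i j =>
      if i = j then gc
      else if PySem.List.pyGetD (PySem.List.pyGetD matrix i []) j 0 >
                PySem.List.pyGetD (PySem.List.pyGetD matrix j []) i 0 ∨
              (PySem.List.pyGetD (PySem.List.pyGetD matrix i []) j 0 =
                PySem.List.pyGetD (PySem.List.pyGetD matrix j []) i 0 ∧
               PySem.List.pyGetD giftIndex i 0 > PySem.List.pyGetD giftIndex j 0)
      then PySem.List.pySetD gc i (PySem.List.pyGetD gc i 0 + 1)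
      else gc)
    (PySem.List.pyRange 0 (friends.length : Int) 1)
    (fun _ => PySem.List.pyRange 0 (friends.length : Int) 1) (zerosL friends)) ?_
  exact congrArg (fun (F : List Int → Int × Int → List Int) =>
    List.foldl F (zerosL friends) (pairsA friends)) hfun

-- count-based win predicate shared by both characterisations
def cWb (friends gifts : List String) (i j : Int) : Bool :=
  decide (((addrs friends gifts).count (i, j) : Int) > ((addrs friends gifts).count (j, i) : Int) ∨
    (((addrs friends gifts).count (i, j) : Int) = ((addrs friends gifts).count (j, i) : Int) ∧
     PySem.List.pyGetD (giFinal friends gifts) i 0 > PySem.List.pyGetD (giFinal friends gifts) j 0))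

lemma tgtA_char (friends gifts : List String) (hne : friends ≠ []) (i j : Int)
    (hi0 : 0 ≤ i) (hi1 : i < (friends.length : Int))
    (hj0 : 0 ≤ j) (hj1 : j < (friends.length : Int)) :
    tgtA (matFinal friends gifts) (giFinal friends gifts) (i, j) =
      if i = j then none else if cWb friends gifts i j = true then some i else none := by
  unfold tgtA
  by_cases hij : i = j
  · simp [hij]
  · rw [if_neg hij, if_neg hij]
    rw [show (i, j).1 = i from rfl, show (i, j).2 = j from rfl] at *
    rw [matFinal_entry friends gifts hne i j hi0 hi1 hj0 hj1,
        matFinal_entry friends gifts hne j i hj0 hj1 hi0 hi1]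
    by_cases hw : ((addrs friends gifts).count (i, j) : Int) >
        ((addrs friends gifts).count (j, i) : Int) ∨
        (((addrs friends gifts).count (i, j) : Int) = ((addrs friends gifts).count (j, i) : Int) ∧
         PySem.List.pyGetD (giFinal friends gifts) i 0 >
           PySem.List.pyGetD (giFinal friends gifts) j 0)
    · rw [if_pos hw, if_pos (by simp only [cWb, decide_eq_true_eq]; exact hw)]
    · rw [if_neg hw, if_neg (by simp only [cWb, decide_eq_true_eq]; exact hw)]

lemma sum_map_pyRange_single (a b k : Int) (f : Int → Nat) (ha : a ≤ k) (hk : k < b)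
    (h0 : ∀ i, a ≤ i → i < b → i ≠ k → f i = 0) :
    ((PySem.List.pyRange a b 1).map f).sum = f k := by
  rw [PySem.List.pyRange_one_append a k b ha (le_of_lt hk), PySem.List.pyRange_one_cons hk]
  rw [List.map_append, List.sum_append, List.map_cons, List.sum_cons]
  have hz1 : ((PySem.List.pyRange a k 1).map f).sum = 0 := by
    apply List.sum_eq_zero
    intro x hx
    rcases List.mem_map.mp hx with ⟨i, hi, rfl⟩
    rw [PySem.List.mem_pyRange_one] at hi
    exact h0 i (by omega) (by omega) (by omega)
  have hz2 : ((PySem.List.pyRange (k + 1) b 1).map f).sum = 0 := by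
    apply List.sum_eq_zero
    intro x hx
    rcases List.mem_map.mp hx with ⟨i, hi, rfl⟩
    rw [PySem.List.mem_pyRange_one] at hi
    exact h0 i (by omega) (by omega) (by omega)
  rw [hz1, hz2]
  simp

lemma getElem_eq_pyGetD (xs : List Int) (k : Nat) (h : k < xs.length) :
    xs[k] = PySem.List.pyGetD xs (k : Int) 0 := by
  rw [PySem.List.pyGetD_eq_getElem xs 0 (by omega) (by exact_mod_cast h)]
  simp

lemma countA_char (friends gifts : List String) (hne : friends ≠ []) (k : Int)
    (hk0 : 0 ≤ k) (hk1 : k < (friends.length : Int)) :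
    (pairsA friends).countP
        (fun e => tgtA (matFinal friends gifts) (giFinal friends gifts) e == some k) =
      ((PySem.List.pyRange 0 k 1).countP (fun j => cWb friends gifts k j)) +
        ((PySem.List.pyRange (k + 1) (friends.length : Int) 1).countP
          (fun j => cWb friends gifts k j)) := by
  unfold pairsA
  rw [List.countP_flatMap]
  rw [sum_map_pyRange_single 0 (friends.length : Int) k _ hk0 hk1 ?side]
  case side =>
    intro i hi0 hi1 hik
    simp only [Function.comp_def]
    rw [List.countP_map]
    apply List.countP_eq_zero.mpr
    intro j hj
    rw [PySem.List.mem_pyRange_one] at hj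
    simp only [Function.comp_def]
    rw [tgtA_char friends gifts hne i j hi0 hi1 (by omega) (by omega)]
    split_ifs <;> simp [hik]
  simp only [Function.comp_def]
  rw [List.countP_map]
  simp only [Function.comp_def]
  rw [PySem.List.pyRange_one_append 0 k (friends.length : Int) hk0 (le_of_lt hk1),
    PySem.List.pyRange_one_cons hk1]
  rw [List.countP_append, List.countP_cons]
  have hmid : (tgtA (matFinal friends gifts) (giFinal friends gifts) (k, k) == some k) = false := by
    rw [tgtA_char friends gifts hne k k hk0 hk1 hk0 hk1]
    simp
  have hleft : (PySem.List.pyRange 0 k 1).countP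
      (fun j => tgtA (matFinal friends gifts) (giFinal friends gifts) (k, j) == some k) =
      (PySem.List.pyRange 0 k 1).countP (fun j => cWb friends gifts k j) := by
    apply List.countP_congr
    intro j hj
    rw [PySem.List.mem_pyRange_one] at hj
    rw [tgtA_char friends gifts hne k j hk0 hk1 (by omega) (by omega)]
    rw [if_neg (by omega : ¬ k = j)]
    by_cases hw : cWb friends gifts k j = true <;> simp [hw]
  have hright : (PySem.List.pyRange (k + 1) (friends.length : Int) 1).countP
      (fun j => tgtA (matFinal friends gifts) (giFinal friends gifts) (k, j) == some k) =
      (PySem.List.pyRange (k + 1) (friends.length : Int) 1).countP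
        (fun j => cWb friends gifts k j) := by
    apply List.countP_congr
    intro j hj
    rw [PySem.List.mem_pyRange_one] at hj
    rw [tgtA_char friends gifts hne k j hk0 hk1 (by omega) (by omega)]
    rw [if_neg (by omega : ¬ k = j)]
    by_cases hw : cWb friends gifts k j = true <;> simp [hw]
  rw [hmid, hleft, hright]
  simp

lemma zerosL_len (friends : List String) :
    ((zerosL friends).length : Int) = (friends.length : Int) := by
  unfold zerosL
  rw [PySem.List.pyRepeat_singleton, List.length_replicate]
  simp

-- signed net counter: getD is the signed sum of matching gifts
lemma getD_netFold (friends : List String) :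
    ∀ (L : List String) (d : PySem.Dict (Int × Int) Int) (k : Int × Int),
      (L.foldl (netStep friends) d).getD k 0 =
        d.getD k 0 +
          (L.map (fun g => if canonK (gAddr friends g) = k then sgnK (gAddr friends g)
            else 0)).sum := by
  intro L
  induction L with
  | nil => intro d k; simp
  | cons g t ih =>
    intro d k
    rw [List.foldl_cons, ih, List.map_cons, List.sum_cons]
    have hstep : (netStep friends d g).getD k 0 =
        d.getD k 0 + (if canonK (gAddr friends g) = k then sgnK (gAddr friends g) else 0) := by
      unfold netStep
      rw [PySem.Dict.getD_insert]
      by_cases hk : k = canonK (gAddr friends g)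
      · rw [if_pos hk, if_pos hk.symm, hk]
      · rw [if_neg hk, if_neg (fun h => hk h.symm)]
        ring
    rw [hstep]
    ring

def netv (friends gifts : List String) (i j : Int) : Int :=
  ((addrs friends gifts).count (i, j) : Int) - ((addrs friends gifts).count (j, i) : Int)

lemma signed_count (x y : Int) (hxy : x < y) :
    ∀ (L : List (Int × Int)),
      (L.map (fun p => if canonK p = (x, y) then sgnK p else 0)).sum =
        (L.count (x, y) : Int) - (L.count (y, x) : Int) := by
  intro L
  induction L with
  | nil => simp
  | cons p t ih =>
    rw [List.map_cons, List.sum_cons, ih, List.count_cons, List.count_cons]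
    obtain ⟨p1, p2⟩ := p
    by_cases h1 : (p1, p2) = (x, y)
    · rw [Prod.mk.injEq] at h1
      obtain ⟨rfl, rfl⟩ := h1
      have : canonK (p1, p2) = (p1, p2) := by unfold canonK; rw [if_pos (by omega : p1 ≤ p2)]
      rw [this, if_pos rfl]
      have hs : sgnK (p1, p2) = 1 := by unfold sgnK; rw [if_pos (by omega : p1 ≤ p2)]
      have hne : ¬ ((p2, p1) == (p1, p2)) = true := by
        simp [Prod.ext_iff]; omega
      simp [hs]
      rw [if_neg (by omega : ¬ (p1 = p2 ∧ p2 = p1))]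
      ring
    · by_cases h2 : (p1, p2) = (y, x)
      · rw [Prod.mk.injEq] at h2
        obtain ⟨rfl, rfl⟩ := h2
        have : canonK (p1, p2) = (p2, p1) := by unfold canonK; rw [if_neg (by omega : ¬ p1 ≤ p2)]
        rw [this, if_pos rfl]
        have hs : sgnK (p1, p2) = -1 := by unfold sgnK; rw [if_neg (by omega : ¬ p1 ≤ p2)]
        simp [hs, Prod.ext_iff]
        rw [if_neg (by omega : ¬ (p1 = p2 ∧ p2 = p1))]
        ring
      · have hc : canonK (p1, p2) ≠ (x, y) := by
          unfold canonK
          split_ifs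
          · exact fun h => h1 h
          · intro h
            rw [Prod.mk.injEq] at h
            exact h2 (by rw [Prod.mk.injEq]; exact ⟨h.2, h.1⟩)
        rw [if_neg hc]
        have e1 : ¬ ((p1, p2) == (x, y)) = true := by simpa using h1
        have e2 : ¬ ((p1, p2) == (y, x)) = true := by simpa using h2
        simp only [e1, e2]
        simp

lemma netFinal_getD (friends gifts : List String) (x y : Int) (hxy : x < y) :
    (netFinal friends gifts).getD (x, y) 0 = netv friends gifts x y := by
  unfold netFinal netv addrs
  rw [getD_netFold, PySem.Dict.getD_empty, zero_add]
  have hm : (gifts.map (fun g => if canonK (gAddr friends g) = (x, y)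
      then sgnK (gAddr friends g) else 0)) =
      ((gifts.map (gAddr friends)).map (fun p => if canonK p = (x, y) then sgnK p else 0)) := by
    rw [List.map_map]
    rfl
  rw [hm, signed_count x y hxy]

lemma keys_netFinal (friends gifts : List String) :
    (netFinal friends gifts).keys =
      PySem.Set.ofList (gifts.map (fun g => canonK (gAddr friends g))) := by
  unfold netFinal
  have h := PySem.Dict.keys_foldl_insert_key (l := gifts)
    (key := fun g => canonK (gAddr friends g))
    (f := fun d g => d.getD (canonK (gAddr friends g)) 0 + sgnK (gAddr friends g))
    (d := (PySem.Dict.empty : PySem.Dict (Int × Int) Int))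
  rw [show (fun (d : PySem.Dict (Int × Int) Int) (g : String) =>
      d.insert (canonK (gAddr friends g))
        (d.getD (canonK (gAddr friends g)) 0 + sgnK (gAddr friends g))) = netStep friends
    from rfl] at h
  rw [h]
  rfl

lemma nodup_keys_netFinal (friends gifts : List String) :
    (netFinal friends gifts).keys.Nodup := by
  unfold netFinal
  exact PySem.Dict.nodup_keys_foldl_insert_key gifts (fun g => canonK (gAddr friends g))
    (fun d g => d.getD (canonK (gAddr friends g)) 0 + sgnK (gAddr friends g))
    PySem.Dict.empty (by simp [PySem.Dict.keys_empty])

lemma mem_keys_netFinal (friends gifts : List String) (k : Int × Int) :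
    k ∈ (netFinal friends gifts).keys ↔ ∃ g ∈ gifts, canonK (gAddr friends g) = k := by
  rw [keys_netFinal, PySem.Set.mem_ofList, List.mem_map]

lemma canonK_inv (i j x y : Int) (h : canonK (i, j) = (x, y)) :
    (i = x ∧ j = y) ∨ (i = y ∧ j = x) := by
  unfold canonK at h
  split_ifs at h
  · rw [Prod.mk.injEq] at h; exact Or.inl h
  · rw [Prod.mk.injEq] at h; exact Or.inr ⟨h.2, h.1⟩

lemma keys_netFinal_bounds (friends gifts : List String) (hne : friends ≠ [])
    (k : Int × Int) (hk : k ∈ (netFinal friends gifts).keys) :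
    0 ≤ k.1 ∧ k.1 < (friends.length : Int) ∧ 0 ≤ k.2 ∧ k.2 < (friends.length : Int) ∧
      k.1 ≤ k.2 := by
  rcases (mem_keys_netFinal friends gifts k).mp hk with ⟨g, _, rfl⟩
  have hb := gAddr_bounds friends hne g
  unfold canonK
  split_ifs with h
  · exact ⟨hb.1, hb.2.1, hb.2.2.1, hb.2.2.2, h⟩
  · exact ⟨hb.2.2.1, hb.2.2.2, hb.1, hb.2.1, by omega⟩

lemma netv_self (friends gifts : List String) (i : Int) : netv friends gifts i i = 0 := by
  unfold netv; ring

lemma canonK_mem_keys_of_netv_ne (friends gifts : List String) (i j : Int)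
    (h : netv friends gifts i j ≠ 0) :
    canonK (i, j) ∈ (netFinal friends gifts).keys := by
  have hij : i ≠ j := by
    intro hh; subst hh; exact h (netv_self friends gifts i)
  have hmem : (i, j) ∈ addrs friends gifts ∨ (j, i) ∈ addrs friends gifts := by
    by_contra hc
    push Not at hc
    have h1 : (addrs friends gifts).count (i, j) = 0 := List.count_eq_zero.mpr hc.1
    have h2 : (addrs friends gifts).count (j, i) = 0 := List.count_eq_zero.mpr hc.2
    unfold netv at h
    omega
  have hcomm : canonK (j, i) = canonK (i, j) := by
    unfold canonK
    split_ifs <;> first | rfl | omega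
  rcases hmem with hm | hm <;>
    rcases List.mem_map.mp hm with ⟨g, hg, hgg⟩
  · exact (mem_keys_netFinal friends gifts _).mpr ⟨g, hg, by rw [hgg]⟩
  · exact (mem_keys_netFinal friends gifts _).mpr ⟨g, hg, by rw [hgg]; exact hcomm⟩

lemma items_netFinal (friends gifts : List String) :
    (netFinal friends gifts).items =
      (netFinal friends gifts).keys.map
        (fun k => (k, (netFinal friends gifts).getD k 0)) := by
  exact PySem.Dict.items_eq_map_keys _ (nodup_keys_netFinal friends gifts) 0

-- rank dictionary: prefix sums over the sorted distinct balances
lemma lessFold_notmem (freq : PySem.Dict Int Int) :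
    ∀ (ks : List Int) (d : PySem.Dict Int Int) (r : Int) (v : Int), v ∉ ks →
      ((ks.foldl (fun (lr : PySem.Dict Int Int × Int) u => (lr.1.insert u lr.2, lr.2 + freq.getD u 0))
        (d, r)).1).getD v 0 = d.getD v 0 := by
  intro ks
  induction ks with
  | nil => intro d r v _; rfl
  | cons u t ih =>
    intro d r v hv
    rw [List.foldl_cons]
    rw [ih (d.insert u r) (r + freq.getD u 0) v (fun h => hv (List.mem_cons_of_mem _ h))]
    rw [PySem.Dict.getD_insert, if_neg (fun (h : v = u) => hv (h ▸ List.mem_cons_self))]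

lemma lessFold_getD (freq : PySem.Dict Int Int) :
    ∀ (ks : List Int) (d : PySem.Dict Int Int) (r : Int), ks.Pairwise (· < ·) →
      ∀ v ∈ ks,
      ((ks.foldl (fun (lr : PySem.Dict Int Int × Int) u => (lr.1.insert u lr.2, lr.2 + freq.getD u 0))
        (d, r)).1).getD v 0 =
        r + (ks.map (fun u => if u < v then freq.getD u 0 else 0)).sum := by
  intro ks
  induction ks with
  | nil => intro _ _ _ v hv; exact absurd hv (List.not_mem_nil)
  | cons u t ih =>
    intro d r hp v hv
    have hu : ∀ w ∈ t, u < w := fun w hw => List.rel_of_pairwise_cons hp hw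
    rw [List.foldl_cons, List.map_cons, List.sum_cons]
    rcases List.mem_cons.mp hv with rfl | hvt
    · have hnmem : v ∉ t := fun h => lt_irrefl v (hu v h)
      rw [lessFold_notmem freq t _ _ v hnmem]
      rw [PySem.Dict.getD_insert, if_pos rfl]
      have hz : (t.map (fun w => if w < v then freq.getD w 0 else 0)).sum = 0 := by
        apply List.sum_eq_zero
        intro x hx
        rcases List.mem_map.mp hx with ⟨w, hw, rfl⟩
        rw [if_neg (by have := hu w hw; omega)]
      rw [if_neg (lt_irrefl v), hz]
      ring
    · rw [ih (d.insert u r) (r + freq.getD u 0) (List.Pairwise.of_cons hp) v hvt]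
      rw [if_pos (hu v hvt)]
      ring

lemma sum_ite_eq_of_nodup :
    ∀ (K : List Int), K.Nodup → ∀ x ∈ K, ∀ (c : Int → Int),
      (K.map (fun u => if u = x then c u else 0)).sum = c x := by
  intro K
  induction K with
  | nil => intro _ x hx; exact absurd hx (List.not_mem_nil)
  | cons u t ih =>
    intro hnd x hx c
    rw [List.map_cons, List.sum_cons]
    rcases List.mem_cons.mp hx with rfl | hxt
    · have hz : (t.map (fun w => if w = x then c w else 0)).sum = 0 := by
        apply List.sum_eq_zero
        intro w hw
        rcases List.mem_map.mp hw with ⟨w', hw', rfl⟩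
        rw [if_neg (fun (h : w' = x) => (List.nodup_cons.mp hnd).1 (h ▸ hw'))]
      rw [if_pos rfl, hz, add_zero]
    · rw [ih (List.nodup_cons.mp hnd).2 x hxt c,
        if_neg (fun (h : u = x) => (List.nodup_cons.mp hnd).1 (h ▸ hxt)), zero_add]

lemma sum_count_lt (K : List Int) (hnd : K.Nodup) :
    ∀ (bal : List Int), (∀ u ∈ bal, u ∈ K) → ∀ v : Int,
      (K.map (fun u => if u < v then (bal.count u : Int) else 0)).sum =
        (bal.countP (fun u => decide (u < v)) : Int) := by
  intro bal
  induction bal with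
  | nil =>
    intro _ v
    simp
  | cons x t ih =>
    intro hmem v
    have hx : x ∈ K := hmem x List.mem_cons_self
    have h1 : (K.map (fun u => if u < v then ((x :: t).count u : Int) else 0)) =
        (K.map (fun u => (if u < v then (t.count u : Int) else 0) +
          (if u = x then (if x < v then (1 : Int) else 0) else 0))) := by
      apply List.map_congr_left
      intro u _
      rw [List.count_cons]
      by_cases hux : u = x
      · subst hux
        simp only [BEq.rfl, if_true]
        by_cases huv : u < v <;> simp [huv]
      · have : ¬ (x == u) = true := by simpa using fun h => hux h.symm
        simp only [this, if_neg hux, add_zero]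
        rfl
    rw [h1, PySem.List.sum_map_add_int, ih (fun u hu => hmem u (List.mem_cons_of_mem _ hu)) v,
      sum_ite_eq_of_nodup K hnd x hx, List.countP_cons]
    by_cases hxv : x < v <;> simp [hxv]

lemma less_getD (bal : List Int) (v : Int) (hv : v ∈ bal) :
    (lessD bal).getD v 0 = (bal.countP (fun u => decide (u < v)) : Int) := by
  have hfreq : freqD bal = PySem.Dict.counter bal := by
    unfold freqD
    exact PySem.Dict.foldl_insert_getD_add_one_eq_counter (κ := Int) bal
  have hks : (freqD bal).keys = PySem.Set.ofList bal := by
    rw [hfreq, PySem.Dict.keys_counter]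
  set ks := PySem.List.sorted (freqD bal).keys (fun x => x) false with hksdef
  have hpw : ks.Pairwise (· < ·) := by
    rw [hksdef, hks]
    exact PySem.List.sorted_ofList_pairwise_lt (xs := bal)
  have hmemks : ∀ u : Int, u ∈ ks ↔ u ∈ bal := by
    intro u
    rw [hksdef, PySem.List.mem_sorted, hks, PySem.Set.mem_ofList]
  have hnd : ks.Nodup := hpw.imp (fun h => ne_of_lt h)
  unfold lessD
  rw [← hksdef]
  rw [lessFold_getD (freqD bal) ks PySem.Dict.empty 0 hpw v ((hmemks v).mpr hv), zero_add]
  have hcnt : (ks.map (fun u => if u < v then (freqD bal).getD u 0 else 0)) =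
      (ks.map (fun u => if u < v then (bal.count u : Int) else 0)) := by
    apply List.map_congr_left
    intro u _
    rw [hfreq, PySem.Dict.getD_counter]
  rw [hcnt, sum_count_lt ks hnd bal (fun u hu => (hmemks u).mpr hu) v]

lemma length_giFinal (friends gifts : List String) :
    (giFinal friends gifts).length = friends.length := by
  unfold giFinal
  have : ∀ (L : List String) (gi : List Int), (L.foldl (giStep friends) gi).length = gi.length := by
    intro L
    induction L with
    | nil => intro gi; rfl
    | cons g t ih =>
      intro gi
      rw [List.foldl_cons, ih]
      unfold giStep
      rw [PySem.List.length_pySetD, PySem.List.length_pySetD]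
  rw [this]
  unfold zerosL
  rw [PySem.List.pyRepeat_singleton, List.length_replicate]
  simp

-- single additive update on the wins list
lemma getD_bump (w : List Int) (x i δ : Int)
    (hx0 : 0 ≤ x) (hx1 : x < (w.length : Int)) (hi0 : 0 ≤ i) (hi1 : i < (w.length : Int)) :
    PySem.List.pyGetD (PySem.List.pySetD w x (PySem.List.pyGetD w x 0 + δ)) i 0 =
      PySem.List.pyGetD w i 0 + (if i = x then δ else 0) := by
  rw [pyGetD_pySetD_int w x i _ 0 hx0 hx1 hi0 hi1]
  by_cases h : i = x
  · rw [if_pos h, if_pos h, h]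
  · rw [if_neg h, if_neg h, add_zero]

lemma getD_drop (w : List Int) (x i : Int)
    (hx0 : 0 ≤ x) (hx1 : x < (w.length : Int)) (hi0 : 0 ≤ i) (hi1 : i < (w.length : Int)) :
    PySem.List.pyGetD (PySem.List.pySetD w x (PySem.List.pyGetD w x 0 - 1)) i 0 =
      PySem.List.pyGetD w i 0 + (if i = x then -1 else 0) := by
  have h : PySem.List.pyGetD w x 0 - 1 = PySem.List.pyGetD w x 0 + (-1) := by ring
  rw [h, getD_bump w x i (-1) hx0 hx1 hi0 hi1]

-- what one net item adds to position i of the wins list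
def contribW (bal : List Int) (i : Int) (p : (Int × Int) × Int) : Int :=
  if p.1.1 = p.1.2 ∨ p.2 = 0 then 0
  else (if 0 < p.2 then (if i = p.1.1 then 1 else 0) else (if i = p.1.2 then 1 else 0))
     + (if PySem.List.pyGetD bal p.1.2 0 < PySem.List.pyGetD bal p.1.1 0
        then (if i = p.1.1 then -1 else 0) else 0)
     + (if PySem.List.pyGetD bal p.1.1 0 < PySem.List.pyGetD bal p.1.2 0
        then (if i = p.1.2 then -1 else 0) else 0)

lemma length_winsStep (bal w : List Int) (p : (Int × Int) × Int) :
    (winsStep bal w p).length = w.length := by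
  unfold winsStep
  split_ifs <;> simp [PySem.List.length_pySetD]

lemma getD_winsStep (bal w : List Int) (p : (Int × Int) × Int) (i : Int)
    (hb : ¬ (p.1.1 = p.1.2 ∨ p.2 = 0) →
      0 ≤ p.1.1 ∧ p.1.1 < (w.length : Int) ∧ 0 ≤ p.1.2 ∧ p.1.2 < (w.length : Int))
    (hi0 : 0 ≤ i) (hi1 : i < (w.length : Int)) :
    PySem.List.pyGetD (winsStep bal w p) i 0 =
      PySem.List.pyGetD w i 0 + contribW bal i p := by
  unfold winsStep contribW
  by_cases hg : p.1.1 = p.1.2 ∨ p.2 = 0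
  · rw [if_pos hg, if_pos hg, add_zero]
  · obtain ⟨hx0, hx1, hy0, hy1⟩ := hb hg
    rw [if_neg hg, if_neg hg]
    set x := p.1.1
    set y := p.1.2
    set w1 := if 0 < p.2 then PySem.List.pySetD w x (PySem.List.pyGetD w x 0 + 1)
              else PySem.List.pySetD w y (PySem.List.pyGetD w y 0 + 1) with hw1
    have hlen1 : (w1.length : Int) = (w.length : Int) := by
      rw [hw1]; split_ifs <;> rw [PySem.List.length_pySetD]
    have h1 : ∀ j : Int, 0 ≤ j → j < (w.length : Int) →
        PySem.List.pyGetD w1 j 0 = PySem.List.pyGetD w j 0 +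
          (if 0 < p.2 then (if j = x then 1 else 0) else (if j = y then 1 else 0)) := by
      intro j hj0 hj1
      rw [hw1]
      by_cases hs : 0 < p.2
      · rw [if_pos hs, if_pos hs]
        exact getD_bump w x j 1 hx0 hx1 hj0 hj1
      · rw [if_neg hs, if_neg hs]
        exact getD_bump w y j 1 hy0 hy1 hj0 hj1
    set w2 := if PySem.List.pyGetD bal y 0 < PySem.List.pyGetD bal x 0
              then PySem.List.pySetD w1 x (PySem.List.pyGetD w1 x 0 - 1) else w1 with hw2
    have hlen2 : (w2.length : Int) = (w.length : Int) := by
      rw [hw2]; split_ifs <;> simp [PySem.List.length_pySetD, hlen1]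
    have h2 : ∀ j : Int, 0 ≤ j → j < (w.length : Int) →
        PySem.List.pyGetD w2 j 0 = PySem.List.pyGetD w1 j 0 +
          (if PySem.List.pyGetD bal y 0 < PySem.List.pyGetD bal x 0
           then (if j = x then -1 else 0) else 0) := by
      intro j hj0 hj1
      rw [hw2]
      by_cases hs : PySem.List.pyGetD bal y 0 < PySem.List.pyGetD bal x 0
      · rw [if_pos hs, if_pos hs]
        exact getD_drop w1 x j hx0 (by omega) hj0 (by omega)
      · rw [if_neg hs, if_neg hs, add_zero]
    by_cases hs3 : PySem.List.pyGetD bal x 0 < PySem.List.pyGetD bal y 0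
    · rw [if_pos hs3, if_pos hs3]
      rw [getD_drop w2 y i hy0 (by omega) hi0 (by omega), h2 i hi0 hi1, h1 i hi0 hi1]
      ring
    · rw [if_neg hs3, if_neg hs3]
      rw [h2 i hi0 hi1, h1 i hi0 hi1]
      ring

lemma winsFold (bal : List Int) :
    ∀ (L : List ((Int × Int) × Int)) (w : List Int),
      (∀ p ∈ L, ¬ (p.1.1 = p.1.2 ∨ p.2 = 0) →
        0 ≤ p.1.1 ∧ p.1.1 < (w.length : Int) ∧ 0 ≤ p.1.2 ∧ p.1.2 < (w.length : Int)) →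
      ∀ i : Int, 0 ≤ i → i < (w.length : Int) →
        PySem.List.pyGetD (L.foldl (winsStep bal) w) i 0 =
          PySem.List.pyGetD w i 0 + (L.map (contribW bal i)).sum := by
  intro L
  induction L with
  | nil => intro w _ i _ _; simp
  | cons p t ih =>
    intro w hb i hi0 hi1
    rw [List.foldl_cons, List.map_cons, List.sum_cons]
    have hlen : ((winsStep bal w p).length : Int) = (w.length : Int) := by
      rw [length_winsStep]
    rw [ih (winsStep bal w p)
      (fun q hq hgq => by rw [hlen]; exact hb q (List.mem_cons_of_mem _ hq) hgq)
      i hi0 (by omega)]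
    rw [getD_winsStep bal w p i (hb p List.mem_cons_self) hi0 hi1]
    ring

lemma zeros_entry (friends : List String) (i : Int) (hi0 : 0 ≤ i)
    (hi1 : i < (friends.length : Int)) :
    PySem.List.pyGetD (zerosL friends) i 0 = 0 := by
  unfold zerosL
  rw [PySem.List.pyRepeat_singleton]
  rw [PySem.List.pyGetD_eq_getElem _ _ hi0 (by simp; omega)]
  simp

lemma cWb_self (friends gifts : List String) (i : Int) : cWb friends gifts i i = false := by
  simp only [cWb, decide_eq_false_iff_not]
  omega

-- A's count for friend i, as a 0/1 sum over the whole index range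
lemma gcA_entry (friends gifts : List String) (hne : friends ≠ []) (i : Int)
    (hi0 : 0 ≤ i) (hi1 : i < (friends.length : Int)) :
    PySem.List.pyGetD (gcA friends (matFinal friends gifts) (giFinal friends gifts)) i 0 =
      ((PySem.List.pyRange 0 (friends.length : Int) 1).map
        (fun j => if cWb friends gifts i j = true then (1 : Int) else 0)).sum := by
  have hbA : ∀ e ∈ pairsA friends, ∀ t,
      tgtA (matFinal friends gifts) (giFinal friends gifts) e = some t →
      0 ≤ t ∧ t < ((zerosL friends).length : Int) := by
    intro e he t ht
    unfold pairsA at he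
    rcases List.mem_flatMap.mp he with ⟨a, ha, hmem⟩
    rcases List.mem_map.mp hmem with ⟨j, hj, rfl⟩
    rw [PySem.List.mem_pyRange_one] at ha hj
    unfold tgtA at ht
    rw [zerosL_len]
    split_ifs at ht
    · cases ht
      exact ⟨by simp; omega, by simp; omega⟩
  rw [gcA_fold]
  rw [foldl_incStep_entry _ (pairsA friends) (zerosL friends) hbA i hi0
    (by rw [zerosL_len]; exact hi1)]
  rw [zeros_entry friends i hi0 hi1, zero_add]
  rw [countA_char friends gifts hne i hi0 hi1]
  rw [PySem.List.pyRange_one_append 0 i (friends.length : Int) hi0 (le_of_lt hi1),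
    PySem.List.pyRange_one_cons hi1]
  rw [List.map_append, List.sum_append, List.map_cons, List.sum_cons]
  rw [cWb_self friends gifts i]
  rw [PySem.List.sum_map_ite_one_zero (fun j => cWb friends gifts i j),
    PySem.List.sum_map_ite_one_zero (fun j => cWb friends gifts i j)]
  push_cast
  simp

-- a sum with (at most) one non-zero term
lemma sum_map_single {α : Type} [DecidableEq α] :
    ∀ (L : List α), L.Nodup → ∀ y ∈ L, ∀ (F : α → Int),
      (∀ j ∈ L, j ≠ y → F j = 0) → (L.map F).sum = F y := by
  intro L
  induction L with
  | nil => intro _ y hy; exact absurd hy (List.not_mem_nil)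
  | cons a t ih =>
    intro hnd y hy F h0
    rw [List.map_cons, List.sum_cons]
    rcases List.mem_cons.mp hy with rfl | hyt
    · have hz : (t.map F).sum = 0 := by
        apply List.sum_eq_zero
        intro x hx
        rcases List.mem_map.mp hx with ⟨j, hj, rfl⟩
        exact h0 j (List.mem_cons_of_mem _ hj)
          (fun h => (List.nodup_cons.mp hnd).1 (h ▸ hj))
      rw [hz, add_zero]
    · rw [ih (List.nodup_cons.mp hnd).2 y hyt F
        (fun j hj hjy => h0 j (List.mem_cons_of_mem _ hj) hjy)]
      rw [h0 a List.mem_cons_self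
        (fun h => (List.nodup_cons.mp hnd).1 (h ▸ hyt)), zero_add]

-- exchanging two finite sums
lemma sum_sum_comm {α β : Type} (K : List α) (L : List β) (h : β → α → Int) :
    (K.map (fun k => (L.map (fun j => h j k)).sum)).sum =
      (L.map (fun j => (K.map (fun k => h j k)).sum)).sum := by
  induction K with
  | nil =>
    simp
  | cons a t ih =>
    rw [List.map_cons, List.sum_cons, ih]
    have : (L.map (fun j => (List.map (fun k => h j k) (a :: t)).sum)) =
        (L.map (fun j => h j a + (t.map (fun k => h j k)).sum)) := by
      apply List.map_congr_left
      intro j _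
      rw [List.map_cons, List.sum_cons]
    rw [this, PySem.List.sum_map_add_int]

def fB (friends gifts : List String) (i j : Int) : Int :=
  (if 0 < netv friends gifts i j then 1 else 0) +
  (if netv friends gifts i j ≠ 0 ∧
      PySem.List.pyGetD (giFinal friends gifts) j 0 <
        PySem.List.pyGetD (giFinal friends gifts) i 0 then -1 else 0)

lemma netv_antisymm (friends gifts : List String) (i j : Int) :
    netv friends gifts i j = -(netv friends gifts j i) := by
  unfold netv; ring

lemma chi_split (friends gifts : List String) (i j : Int) :
    (if cWb friends gifts i j = true then (1 : Int) else 0) =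
      (if PySem.List.pyGetD (giFinal friends gifts) j 0 <
          PySem.List.pyGetD (giFinal friends gifts) i 0 then (1 : Int) else 0) +
        fB friends gifts i j := by
  simp only [cWb, fB, netv, decide_eq_true_eq]
  split_ifs <;> omega

lemma canonK_of_le {a b : Int} (h : a ≤ b) : canonK (a, b) = (a, b) := by
  unfold canonK; rw [if_pos h]

lemma contrib_pair_left (friends gifts : List String) (k1 k2 : Int) (hlt : k1 < k2) :
    contribW (giFinal friends gifts) k1 ((k1, k2), netv friends gifts k1 k2) =
      fB friends gifts k1 k2 := by
  simp only [contribW, fB]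
  split_ifs <;> omega

lemma contrib_pair_right (friends gifts : List String) (k1 k2 : Int) (hlt : k1 < k2) :
    contribW (giFinal friends gifts) k2 ((k1, k2), netv friends gifts k1 k2) =
      fB friends gifts k2 k1 := by
  simp only [contribW, fB]
  rw [netv_antisymm friends gifts k2 k1]
  split_ifs <;> omega

lemma contrib_zero (bal : List Int) (i k1 k2 d : Int) (h1 : i ≠ k1) (h2 : i ≠ k2) :
    contribW bal i ((k1, k2), d) = 0 := by
  simp only [contribW]
  split_ifs <;> omega

lemma sum_contrib (friends gifts : List String) (hne : friends ≠ []) (i : Int)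
    (hi0 : 0 ≤ i) (hi1 : i < (friends.length : Int)) :
    ((netFinal friends gifts).keys.map
        (fun k => contribW (giFinal friends gifts) i
          (k, (netFinal friends gifts).getD k 0))).sum =
      ((PySem.List.pyRange 0 (friends.length : Int) 1).map
        (fun j => fB friends gifts i j)).sum := by
  have hnd := nodup_keys_netFinal friends gifts
  have hC1 : ∀ k ∈ (netFinal friends gifts).keys,
      contribW (giFinal friends gifts) i (k, (netFinal friends gifts).getD k 0) =
        ((PySem.List.pyRange 0 (friends.length : Int) 1).map
          (fun j => if k = canonK (i, j) ∧ j ≠ i then fB friends gifts i j else 0)).sum := by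
    intro k hk
    obtain ⟨hb1, hb2, hb3, hb4, hb5⟩ := keys_netFinal_bounds friends gifts hne k hk
    obtain ⟨k1, k2⟩ := k
    dsimp only at hb1 hb2 hb3 hb4 hb5
    by_cases hEq : k1 = k2
    · subst hEq
      have hL : contribW (giFinal friends gifts) i
          ((k1, k1), (netFinal friends gifts).getD (k1, k1) 0) = 0 := by
        simp [contribW]
      rw [hL]
      symm
      apply List.sum_eq_zero
      intro x hx
      rcases List.mem_map.mp hx with ⟨j, hj, rfl⟩
      rw [if_neg]
      rintro ⟨hc, hji⟩
      rcases canonK_inv i j k1 k1 hc.symm with ⟨rfl, rfl⟩ | ⟨rfl, rfl⟩ <;> exact hji rfl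
    · have hlt : k1 < k2 := lt_of_le_of_ne hb5 hEq
      have hd := netFinal_getD friends gifts k1 k2 hlt
      rw [hd]
      by_cases hik1 : i = k1
      · subst hik1
        rw [contrib_pair_left friends gifts i k2 hlt]
        have hs := sum_map_single (PySem.List.pyRange 0 (friends.length : Int) 1)
          (PySem.List.nodup_pyRange_one _ _) k2
          (PySem.List.mem_pyRange_one.mpr ⟨by omega, by omega⟩)
          (fun j => if (i, k2) = canonK (i, j) ∧ j ≠ i then fB friends gifts i j else 0)
          (by
            intro j hj hjk
            beta_reduce
            rw [if_neg]
            rintro ⟨hc, hji⟩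
            rcases canonK_inv i j i k2 hc.symm with ⟨_, rfl⟩ | ⟨hik, rfl⟩
            · exact hjk rfl
            · omega)
        rw [hs]
        beta_reduce
        rw [if_pos ⟨(canonK_of_le (by omega : i ≤ k2)).symm, by omega⟩]
      · by_cases hik2 : i = k2
        · subst hik2
          rw [contrib_pair_right friends gifts k1 i hlt]
          have hs := sum_map_single (PySem.List.pyRange 0 (friends.length : Int) 1)
            (PySem.List.nodup_pyRange_one _ _) k1
            (PySem.List.mem_pyRange_one.mpr ⟨by omega, by omega⟩)
            (fun j => if (k1, i) = canonK (i, j) ∧ j ≠ i then fB friends gifts i j else 0)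
            (by
              intro j hj hjk
              beta_reduce
              rw [if_neg]
              rintro ⟨hc, hji⟩
              rcases canonK_inv i j k1 i hc.symm with ⟨hik, rfl⟩ | ⟨_, rfl⟩
              · omega
              · exact hjk rfl)
          rw [hs]
          beta_reduce
          have hck : canonK (i, k1) = (k1, i) := by
            unfold canonK; rw [if_neg (by omega : ¬ i ≤ k1)]
          rw [if_pos ⟨hck.symm, by omega⟩]
        · rw [contrib_zero (giFinal friends gifts) i k1 k2 _ hik1 hik2]
          symm
          apply List.sum_eq_zero
          intro x hx
          rcases List.mem_map.mp hx with ⟨j, hj, rfl⟩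
          rw [if_neg]
          rintro ⟨hc, hji⟩
          rcases canonK_inv i j k1 k2 hc.symm with ⟨hik, _⟩ | ⟨hik, _⟩
          · exact hik1 hik
          · exact hik2 hik
  rw [List.map_congr_left hC1]
  rw [sum_sum_comm ((netFinal friends gifts).keys) (PySem.List.pyRange 0 (friends.length : Int) 1)
    (fun j k => if k = canonK (i, j) ∧ j ≠ i then fB friends gifts i j else 0)]
  refine congrArg List.sum (List.map_congr_left ?_)
  intro j hj
  rw [PySem.List.mem_pyRange_one] at hj
  by_cases hf : fB friends gifts i j = 0
  · rw [hf]
    apply List.sum_eq_zero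
    intro x hx
    rcases List.mem_map.mp hx with ⟨k, hk, rfl⟩
    split_ifs <;> rfl
  · have hnv : netv friends gifts i j ≠ 0 := by
      intro h0
      apply hf
      simp [fB, h0]
    have hji : j ≠ i := by
      intro h
      subst h
      exact hnv (netv_self friends gifts j)
    have hky := canonK_mem_keys_of_netv_ne friends gifts i j hnv
    have hs := sum_map_single ((netFinal friends gifts).keys) hnd (canonK (i, j)) hky
      (fun k => if k = canonK (i, j) ∧ j ≠ i then fB friends gifts i j else 0)
      (by
        intro k hk hkc
        beta_reduce
        rw [if_neg]
        rintro ⟨hc, _⟩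
        exact hkc hc)
    rw [hs]
    beta_reduce
    rw [if_pos ⟨rfl, hji⟩]

lemma length_winsFoldl (bal : List Int) :
    ∀ (L : List ((Int × Int) × Int)) (w : List Int),
      (L.foldl (winsStep bal) w).length = w.length := by
  intro L
  induction L with
  | nil => intro w; rfl
  | cons p t ih =>
    intro w
    rw [List.foldl_cons, ih, length_winsStep]

lemma zerosL_len_nat (friends : List String) : (zerosL friends).length = friends.length := by
  have := zerosL_len friends
  exact_mod_cast this

lemma winsB_eq_gcA (friends gifts : List String) (hne : friends ≠ []) :
    winsB friends gifts = gcA friends (matFinal friends gifts) (giFinal friends gifts) := by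
  have hbal : (giFinal friends gifts).length = friends.length := length_giFinal friends gifts
  have hw0len : (wins0L (giFinal friends gifts)).length = friends.length := by
    unfold wins0L
    rw [List.length_map, hbal]
  have hlenL : (winsB friends gifts).length = friends.length := by
    unfold winsB
    rw [length_winsFoldl, hw0len]
  have hlenR : (gcA friends (matFinal friends gifts) (giFinal friends gifts)).length =
      friends.length := by
    rw [gcA_fold, length_foldl_incStep, zerosL_len_nat]
  apply List.ext_getElem (by rw [hlenL, hlenR])
  intro kk h1 h2
  have hkk : kk < friends.length := by rw [hlenL] at h1; exact h1
  have hi0 : (0 : Int) ≤ (kk : Int) := by omega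
  have hi1 : ((kk : Int)) < (friends.length : Int) := by exact_mod_cast hkk
  rw [getElem_eq_pyGetD _ kk h1, getElem_eq_pyGetD _ kk h2]
  rw [gcA_entry friends gifts hne (kk : Int) hi0 hi1]
  unfold winsB
  rw [winsFold (giFinal friends gifts) ((netFinal friends gifts).items)
    (wins0L (giFinal friends gifts))
    (by
      intro p hp hg
      rw [items_netFinal friends gifts] at hp
      rcases List.mem_map.mp hp with ⟨k, hk, rfl⟩
      have hb := keys_netFinal_bounds friends gifts hne k hk
      rw [hw0len]
      exact ⟨hb.1, hb.2.1, hb.2.2.1, hb.2.2.2.1⟩)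
    (kk : Int) hi0 (by rw [hw0len]; exact hi1)]
  -- starting value: the rank of friend kk
  have hw0 : PySem.List.pyGetD (wins0L (giFinal friends gifts)) (kk : Int) 0 =
      ((giFinal friends gifts).countP (fun u =>
        decide (u < PySem.List.pyGetD (giFinal friends gifts) (kk : Int) 0)) : Int) := by
    rw [← getElem_eq_pyGetD _ kk (by rw [hw0len]; exact hkk)]
    unfold wins0L
    rw [List.getElem_map]
    rw [less_getD _ _ (List.getElem_mem _)]
    rw [getElem_eq_pyGetD _ kk (by rw [hbal]; exact hkk)]
  rw [hw0]
  -- the correction sum over the net items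
  have hitems : (((netFinal friends gifts).items).map
      (contribW (giFinal friends gifts) (kk : Int))).sum =
      ((PySem.List.pyRange 0 (friends.length : Int) 1).map
        (fun j => fB friends gifts (kk : Int) j)).sum := by
    rw [items_netFinal friends gifts, List.map_map]
    have hfun : ((contribW (giFinal friends gifts) (kk : Int)) ∘
        (fun k => (k, (netFinal friends gifts).getD k 0))) =
        (fun k => contribW (giFinal friends gifts) (kk : Int)
          (k, (netFinal friends gifts).getD k 0)) := rfl
    rw [hfun, sum_contrib friends gifts hne (kk : Int) hi0 hi1]
  rw [hitems]
  -- split A's 0/1 sum into the rank part and the correction part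
  have hsplit : ((PySem.List.pyRange 0 (friends.length : Int) 1).map
      (fun j => if cWb friends gifts (kk : Int) j = true then (1 : Int) else 0)) =
      ((PySem.List.pyRange 0 (friends.length : Int) 1).map
        (fun j => (if PySem.List.pyGetD (giFinal friends gifts) j 0 <
            PySem.List.pyGetD (giFinal friends gifts) (kk : Int) 0 then (1 : Int) else 0) +
          fB friends gifts (kk : Int) j)) := by
    apply List.map_congr_left
    intro j _
    exact chi_split friends gifts (kk : Int) j
  rw [hsplit, PySem.List.sum_map_add_int]
  -- the rank part is the number of friends with smaller balance
  have hcnt : ((PySem.List.pyRange 0 (friends.length : Int) 1).map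
      (fun j => if PySem.List.pyGetD (giFinal friends gifts) j 0 <
          PySem.List.pyGetD (giFinal friends gifts) (kk : Int) 0 then (1 : Int) else 0)).sum =
      ((giFinal friends gifts).countP (fun u =>
        decide (u < PySem.List.pyGetD (giFinal friends gifts) (kk : Int) 0)) : Int) := by
    have hrange : PySem.List.pyRange 0 (friends.length : Int) 1 =
        PySem.List.pyRange 0 ((giFinal friends gifts).length : Int) 1 := by
      rw [hbal]
    have hm : ((PySem.List.pyRange 0 (friends.length : Int) 1).map
        (fun j => if PySem.List.pyGetD (giFinal friends gifts) j 0 <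
            PySem.List.pyGetD (giFinal friends gifts) (kk : Int) 0 then (1 : Int) else 0)) =
        ((giFinal friends gifts).map (fun u =>
          if (fun u => decide (u < PySem.List.pyGetD (giFinal friends gifts) (kk : Int) 0)) u =
            true then (1 : Int) else 0)) := by
      rw [hrange]
      rw [show ((PySem.List.pyRange 0 ((giFinal friends gifts).length : Int) 1).map
          (fun j => if PySem.List.pyGetD (giFinal friends gifts) j 0 <
              PySem.List.pyGetD (giFinal friends gifts) (kk : Int) 0 then (1 : Int) else 0)) =
          (((PySem.List.pyRange 0 ((giFinal friends gifts).length : Int) 1).map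
            (fun j => PySem.List.pyGetD (giFinal friends gifts) j 0)).map
              (fun u => if u < PySem.List.pyGetD (giFinal friends gifts) (kk : Int) 0
                then (1 : Int) else 0)) from by rw [List.map_map]; rfl]
      rw [PySem.List.map_pyGetD_pyRange_zero']
      apply List.map_congr_left
      intro u _
      simp only [decide_eq_true_eq]
    rw [hm, PySem.List.sum_map_ite_one_zero]
  rw [hcnt]

-- ===== VERDICT (by name: the statement is the Claim_ definition above) =====
theorem solution_spec : Claim_equal_solution := by
  intro friends gifts _ hpre
  unfold Spec_solution
  rw [solutionA_staged, solutionB_staged, winsB_eq_gcA friends gifts hpre.1]
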